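-- pv_equiv track=rewrite | github.com/yan073/agdc-v2 | datacube/api/_dask.py | _get_chunks_and_offsets
-- ===== SOURCE A (Python) =====
-- def _get_chunks_and_offsets(su_size, chunk_size):
--     offsets = [()] * len(su_size)
--     chunks = [()] * len(su_size)
--     for i, (file_lengths, chunk_length) in enumerate(zip(su_size, chunk_size)):
--         prev_file_cum = 0
--         for file_length in file_lengths:
--             d = file_length // chunk_length
--             m = file_length % chunk_length
--             file_dim_chunks = (chunk_length,) * d
--             if m:
--                 file_dim_chunks += (m,)
--             chunks[i] += (file_dim_chunks,)
--             offsets[i] += (prev_file_cum, )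
--             prev_file_cum += len(file_dim_chunks)
--     return chunks, offsets
-- ===== SOURCE B (Python) =====
-- def _file_chunks(file_length, chunk_length):
--     d, m = divmod(file_length, chunk_length)
--     return (chunk_length,) * d + (((m,) if m else ()))
--
--
-- def _exclusive_prefix(lengths):
--     out, total = [], 0
--     for n in lengths:
--         out.append(total)
--         total += n
--     return tuple(out)
--
--
-- def _get_chunks_and_offsets(su_size, chunk_size):
--     chunks = [tuple(_file_chunks(fl, cl) for fl in fls)
--               for fls, cl in zip(su_size, chunk_size)]
--     offsets = [_exclusive_prefix([len(c) for c in dim]) for dim in chunks]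
--     return chunks, offsets
-- ===== Notes on version B (the rewrite author's own statement) =====
-- stated objective: alternative
-- what changed: Replaces A's single stateful loop that grows pre-allocated chunks/offsets slots by repeated tuple += with a two-phase decomposition: a map building each dimension's chunk tuples, then a separate exclusive-prefix-sum pass deriving the offsets from the chunk-tuple lengths; Pre_ excludes su_size longer than chunk_size, where A's trailing empty-tuple slots are an accident of its pre-allocation and zip-truncation (B's zip-length output is equally defensible), and zero chunk sizes where A raises ZeroDivisionError.
-- outside the precondition, e.g. on _get_chunks_and_offsets([[2]], []): A returns ([()], [()]), B returns ([], [])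
import Mathlib
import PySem

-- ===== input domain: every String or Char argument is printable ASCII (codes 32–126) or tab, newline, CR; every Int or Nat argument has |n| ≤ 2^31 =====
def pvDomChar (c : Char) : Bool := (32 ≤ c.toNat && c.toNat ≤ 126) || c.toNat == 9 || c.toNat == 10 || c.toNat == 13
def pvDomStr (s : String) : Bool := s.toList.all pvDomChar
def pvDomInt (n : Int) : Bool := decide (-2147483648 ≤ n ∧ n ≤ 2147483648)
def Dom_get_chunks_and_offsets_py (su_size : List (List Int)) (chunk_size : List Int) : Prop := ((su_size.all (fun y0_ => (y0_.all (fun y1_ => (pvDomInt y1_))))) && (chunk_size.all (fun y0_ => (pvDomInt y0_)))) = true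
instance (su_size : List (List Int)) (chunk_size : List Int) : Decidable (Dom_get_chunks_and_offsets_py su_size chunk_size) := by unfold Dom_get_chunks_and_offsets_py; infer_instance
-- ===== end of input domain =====

-- B restates A's build-as-you-go loop as a map producing each dimension's chunk tuples,
-- followed by an exclusive-prefix-sum pass deriving the offsets from the chunk-tuple lengths
-- (a different decomposition of the same computation).

-- ===== PORT A =====
-- the body of A's inner 'for file_length in file_lengths' loop; state = (chunks[i], offsets[i], prev_file_cum)
def pvAInner (chunk_length : Int) (st : List (List Int) × List Int × Int) (file_length : Int) :
    List (List Int) × List Int × Int :=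
  let d := PySem.Int.floordiv file_length chunk_length
  let m := PySem.Int.mod file_length chunk_length
  let file_dim_chunks := List.replicate d.toNat chunk_length ++ (if m ≠ 0 then [m] else [])
  (st.1 ++ [file_dim_chunks], st.2.1 ++ [st.2.2], st.2.2 + (file_dim_chunks.length : Int))

-- the body of A's outer 'for i, (file_lengths, chunk_length) in enumerate(zip(...))' loop
def pvAStep (st : List (List (List Int)) × List (List Int)) (p : Int × (List Int × Int)) :
    List (List (List Int)) × List (List Int) :=
  let i := p.1.toNat
  let file_lengths := p.2.1
  let chunk_length := p.2.2
  let inner := file_lengths.foldl (pvAInner chunk_length)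
    (st.1.getD i [], st.2.getD i [], (0 : Int))
  (st.1.set i inner.1, st.2.set i inner.2.1)

def get_chunks_and_offsets_py (su_size : List (List Int)) (chunk_size : List Int) :
    List (List (List Int)) × List (List Int) :=
  let init : List (List (List Int)) × List (List Int) :=
    (List.replicate su_size.length [], List.replicate su_size.length [])
  (PySem.List.enumerate (su_size.zip chunk_size)).foldl pvAStep init

-- ===== PORT B =====
def pvFileChunks (file_length chunk_length : Int) : List Int :=
  let d := PySem.Int.floordiv file_length chunk_length
  let m := PySem.Int.mod file_length chunk_length
  List.replicate d.toNat chunk_length ++ (if m ≠ 0 then [m] else [])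

def pvEpStep (st : List Int × Int) (n : Int) : List Int × Int := (st.1 ++ [st.2], st.2 + n)

def pvExclusivePrefix (lengths : List Int) : List Int :=
  (lengths.foldl pvEpStep ([], 0)).1

def get_chunks_and_offsets_py_alt (su_size : List (List Int)) (chunk_size : List Int) :
    List (List (List Int)) × List (List Int) :=
  let chunks := (su_size.zip chunk_size).map (fun p => p.1.map (fun fl => pvFileChunks fl p.2))
  let offsets := chunks.map (fun dim => pvExclusivePrefix (dim.map (fun c => (c.length : Int))))
  (chunks, offsets)

-- ===== PRECONDITION & SPEC =====
-- Pre_ excludes (a) zero chunk sizes zipped with a nonempty file-length list, where A raises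
-- ZeroDivisionError (B raises there too), and (b) su_size longer than chunk_size, where A's
-- trailing empty-tuple slots are an accident of its pre-allocation plus zip truncation and
-- B's zip-length result is equally defensible.
def Pre_get_chunks_and_offsets_py (su_size : List (List Int)) (chunk_size : List Int) : Prop :=
  su_size.length ≤ chunk_size.length ∧ ∀ p ∈ su_size.zip chunk_size, p.1 ≠ [] → p.2 ≠ 0
instance (su_size : List (List Int)) (chunk_size : List Int) : Decidable (Pre_get_chunks_and_offsets_py su_size chunk_size) := by unfold Pre_get_chunks_and_offsets_py; infer_instance

def pvWitness_get_chunks_and_offsets_py : List (List Int) × List Int := ([[5, 3], [7]], [2, 4])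

def Spec_get_chunks_and_offsets_py (su_size : List (List Int)) (chunk_size : List Int) (out : List (List (List Int)) × List (List Int)) : Prop := out = get_chunks_and_offsets_py_alt su_size chunk_size
instance (su_size : List (List Int)) (chunk_size : List Int) (out : List (List (List Int)) × List (List Int)) : Decidable (Spec_get_chunks_and_offsets_py su_size chunk_size out) := by unfold Spec_get_chunks_and_offsets_py; infer_instance

-- ===== CLAIM (what is proved, stated in full; the proofs are below) =====
def Claim_equal_get_chunks_and_offsets_py : Prop := ∀ (su_size : List (List Int)) (chunk_size : List Int), Dom_get_chunks_and_offsets_py su_size chunk_size → Pre_get_chunks_and_offsets_py su_size chunk_size → Spec_get_chunks_and_offsets_py su_size chunk_size (get_chunks_and_offsets_py su_size chunk_size)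

-- ===== LEMMAS AND PROOFS =====

theorem getD_append_len {α : Type} (d : α) (X : List α) (y : α) (t : List α) :
    (X ++ y :: t).getD X.length d = y := by
  rw [List.getD_eq_getElem?_getD, List.getElem?_append_right (le_refl _)]
  simp

theorem set_append_len {α : Type} (X : List α) (y v : α) (t : List α) :
    (X ++ y :: t).set X.length v = X ++ v :: t := by
  rw [List.set_append_right _ _ (le_refl _)]
  simp

theorem pvAInner_eq (cl : Int) (st : List (List Int) × List Int × Int) (fl : Int) :
    pvAInner cl st fl =
      (st.1 ++ [pvFileChunks fl cl], st.2.1 ++ [st.2.2], st.2.2 + ((pvFileChunks fl cl).length : Int)) := rfl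

-- A's inner loop builds chunks[i] by map and offsets[i]/prev_file_cum exactly as the pvEpStep fold
theorem innerA_eq (fls : List Int) (cl : Int) (c0 : List (List Int)) (o0 : List Int) (p0 : Int) :
    fls.foldl (pvAInner cl) (c0, o0, p0) =
      (c0 ++ fls.map (fun fl => pvFileChunks fl cl),
       (fls.map (fun fl => ((pvFileChunks fl cl).length : Int))).foldl pvEpStep (o0, p0)) := by
  induction fls generalizing c0 o0 p0 with
  | nil => simp
  | cons fl fls ih =>
    simp only [List.foldl_cons, List.map_cons, pvAInner_eq, pvEpStep]
    rw [ih]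
    simp

-- the outer loop: folding over the enumerated zip, with indices starting at the length of the
-- already-finished prefix X/Y, fills in the map of the remaining pairs
theorem outerA_eq (z : List (List Int × Int)) (X : List (List (List Int))) (Y : List (List Int)) (m : Nat)
    (hXY : X.length = Y.length) (hm : z.length ≤ m) :
    (PySem.List.enumerate z (X.length : Int)).foldl pvAStep
      (X ++ List.replicate m [], Y ++ List.replicate m []) =
    (X ++ z.map (fun p => p.1.map (fun fl => pvFileChunks fl p.2)) ++ List.replicate (m - z.length) [],
     Y ++ z.map (fun p => ((p.1.map (fun fl => ((pvFileChunks fl p.2).length : Int))).foldl pvEpStep ([], 0)).1)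
       ++ List.replicate (m - z.length) []) := by
  induction z generalizing X Y m with
  | nil => simp
  | cons e z ih =>
    obtain ⟨m, rfl⟩ : ∃ m', m = m' + 1 := ⟨m - 1, by simp only [List.length_cons] at hm; omega⟩
    rw [PySem.List.enumerate_cons, List.foldl_cons]
    have hstep : pvAStep (X ++ List.replicate (m + 1) [], Y ++ List.replicate (m + 1) [])
        ((X.length : Int), e) =
        (X ++ [e.1.map (fun fl => pvFileChunks fl e.2)] ++ List.replicate m [],
         Y ++ [((e.1.map (fun fl => ((pvFileChunks fl e.2).length : Int))).foldl pvEpStep ([], 0)).1]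
           ++ List.replicate m []) := by
      simp only [pvAStep, Int.toNat_natCast, List.replicate_succ, hXY, getD_append_len, innerA_eq]
      rw [← hXY]
      rw [set_append_len, hXY, set_append_len, ← hXY]
      simp [List.append_assoc]
    rw [hstep]
    have hlen : ((X ++ [e.1.map (fun fl => pvFileChunks fl e.2)]).length : Int) = (X.length : Int) + 1 := by
      simp
    have := ih (X ++ [e.1.map (fun fl => pvFileChunks fl e.2)])
      (Y ++ [((e.1.map (fun fl => ((pvFileChunks fl e.2).length : Int))).foldl pvEpStep ([], 0)).1])
      m (by simp [hXY]) (by simpa using hm)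
    rw [hlen] at this
    rw [this]
    simp [List.append_assoc]

-- ===== VERDICT (by name: the statement is the Claim_ definition above) =====
theorem get_chunks_and_offsets_py_spec : Claim_equal_get_chunks_and_offsets_py := by
  intro su cs _ hpre
  unfold Spec_get_chunks_and_offsets_py get_chunks_and_offsets_py get_chunks_and_offsets_py_alt
  have hle := hpre.1
  have hz : (su.zip cs).length = su.length := by
    simp [List.length_zip]; omega
  have h := outerA_eq (su.zip cs) [] [] su.length rfl (by omega)
  simp only [List.length_nil, Int.natCast_zero, List.nil_append, hz, Nat.sub_self,
    List.replicate_zero, List.append_nil] at h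
  rw [h]
  refine Prod.ext rfl ?_
  simp only [List.map_map]
  apply List.map_congr_left
  intro p _
  simp only [pvExclusivePrefix, Function.comp_def, List.map_map]
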